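-- pv_equiv track=rewrite | github.com/vhsw/CodeMasters_Tourney | Python 3/magicalWell.py | magicalWell
-- ===== SOURCE A (Python) =====
-- def magicalWell(a, b, n):
--     s = 0
--     while n:
--         s += a*b
--         a += 1
--         b += 1
--         n -= 1
--     return s
-- ===== SOURCE B (Python) =====
-- def magicalWell(a, b, n):
--     # Closed form: sum_{i=0}^{n-1} (a+i)(b+i)
--     return n*a*b + (a + b) * (n*(n-1)//2) + (n-1)*n*(2*n-1)//6
-- ===== Notes on version B (the rewrite author's own statement) =====
-- stated objective: faster
-- what changed: Replaces the O(n) accumulation loop with the closed-form polynomial n*a*b + (a+b)*n(n-1)/2 + (n-1)n(2n-1)/6 from the arithmetic/square-sum series formulas.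
import Mathlib
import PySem

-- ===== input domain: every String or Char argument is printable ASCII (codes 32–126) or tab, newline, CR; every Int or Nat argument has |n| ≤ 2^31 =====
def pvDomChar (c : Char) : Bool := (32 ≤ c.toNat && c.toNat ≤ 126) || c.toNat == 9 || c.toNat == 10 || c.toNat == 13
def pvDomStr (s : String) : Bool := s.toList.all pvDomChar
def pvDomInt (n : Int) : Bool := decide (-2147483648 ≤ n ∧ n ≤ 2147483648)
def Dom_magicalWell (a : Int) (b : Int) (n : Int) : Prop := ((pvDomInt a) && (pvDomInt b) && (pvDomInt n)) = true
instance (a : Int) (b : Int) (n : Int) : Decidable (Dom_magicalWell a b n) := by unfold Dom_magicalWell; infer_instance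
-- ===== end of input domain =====

-- B replaces A's O(n) accumulation loop by the closed-form polynomial (arithmetic/square-sum series); objective: faster.

-- ===== PORT A =====
-- A's while-loop: state (a, b, s), one iteration per remaining step; for n < 0 the
-- Python loop never terminates, so the port recurses on n.toNat and Pre_ requires 0 ≤ n.
def magicalWellLoop (a : Int) (b : Int) (s : Int) : Nat → Int
  | 0 => s
  | k + 1 => magicalWellLoop (a + 1) (b + 1) (s + a * b) k

def magicalWell (a : Int) (b : Int) (n : Int) : Int :=
  magicalWellLoop a b 0 n.toNat

-- ===== PORT B =====
def magicalWell_alt (a : Int) (b : Int) (n : Int) : Int :=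
  n * a * b + (a + b) * (PySem.Int.floordiv (n * (n - 1)) 2)
    + PySem.Int.floordiv ((n - 1) * n * (2 * n - 1)) 6

-- ===== PRECONDITION & SPEC =====
-- Pre_ excludes n < 0, on which A's while-loop never terminates (n is decremented past 0 forever).
def Pre_magicalWell (a : Int) (b : Int) (n : Int) : Prop := 0 ≤ n
instance (a : Int) (b : Int) (n : Int) : Decidable (Pre_magicalWell a b n) := by unfold Pre_magicalWell; infer_instance
def pvWitness_magicalWell : Int × Int × Int := (2, 3, 4)

def Spec_magicalWell (a : Int) (b : Int) (n : Int) (out : Int) : Prop := out = magicalWell_alt a b n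
instance (a : Int) (b : Int) (n : Int) (out : Int) : Decidable (Spec_magicalWell a b n out) := by unfold Spec_magicalWell; infer_instance

-- ===== CLAIM (what is proved, stated in full; the proofs are below) =====
def Claim_equal_magicalWell : Prop := ∀ (a : Int) (b : Int) (n : Int), Dom_magicalWell a b n → Pre_magicalWell a b n → Spec_magicalWell a b n (magicalWell a b n)

-- ===== LEMMAS AND PROOFS =====

theorem pvDvd2 (k : Nat) : ∃ m : Int, (k : Int) * ((k : Int) - 1) = 2 * m := by
  induction k with
  | zero => exact ⟨0, by norm_num⟩
  | succ k ih =>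
    obtain ⟨m, hm⟩ := ih
    exact ⟨m + (k : Int), by push_cast; linear_combination hm⟩

theorem pvDvd6 (k : Nat) :
    ∃ p : Int, ((k : Int) - 1) * (k : Int) * (2 * (k : Int) - 1) = 6 * p := by
  induction k with
  | zero => exact ⟨0, by norm_num⟩
  | succ k ih =>
    obtain ⟨p, hp⟩ := ih
    exact ⟨p + (k : Int) * (k : Int), by push_cast; linear_combination hp⟩

theorem magicalWellLoop_closed (k : Nat) : ∀ (a b s : Int),
    magicalWellLoop a b s k =
      s + (k : Int) * a * b + (a + b) * ((k : Int) * ((k : Int) - 1) / 2)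
        + ((k : Int) - 1) * (k : Int) * (2 * (k : Int) - 1) / 6 := by
  induction k with
  | zero => intro a b s; simp [magicalWellLoop]
  | succ k ih =>
    intro a b s
    obtain ⟨m, hm⟩ := pvDvd2 k
    obtain ⟨p, hp⟩ := pvDvd6 k
    have hm' : ((k : Int) + 1) * ((k : Int) + 1 - 1) = 2 * (m + (k : Int)) := by
      linear_combination hm
    have hp' : ((k : Int) + 1 - 1) * ((k : Int) + 1) * (2 * ((k : Int) + 1) - 1)
        = 6 * (p + (k : Int) * (k : Int)) := by
      linear_combination hp
    rw [magicalWellLoop, ih]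
    push_cast
    rw [hm, hm', hp, hp',
        Int.mul_ediv_cancel_left _ (by norm_num : (2:Int) ≠ 0),
        Int.mul_ediv_cancel_left _ (by norm_num : (2:Int) ≠ 0),
        Int.mul_ediv_cancel_left _ (by norm_num : (6:Int) ≠ 0),
        Int.mul_ediv_cancel_left _ (by norm_num : (6:Int) ≠ 0)]
    linear_combination (-1 : Int) * hm

-- ===== VERDICT (by name: the statement is the Claim_ definition above) =====
theorem magicalWell_spec : Claim_equal_magicalWell := by
  intro a b n _ hn
  unfold Spec_magicalWell magicalWell magicalWell_alt
  have hk : ((n.toNat : Int)) = n := Int.toNat_of_nonneg hn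
  rw [magicalWellLoop_closed, hk,
      PySem.Int.floordiv_eq_ediv_of_pos (by norm_num : (0:Int) < 2),
      PySem.Int.floordiv_eq_ediv_of_pos (by norm_num : (0:Int) < 6)]
  ring_nf
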